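-- pv_equiv track=rewrite | github.com/omkarlanghe/Python-programming | Dictionary/countOfUpperLowerInDict.py | countofLowerCase
-- ===== SOURCE A (Python) =====
-- def countofLowerCase(sentence):
--     result = {}
--     count = 0
--     for ch in sentence:
--         if ch.islower() == True:
--             if result.get(ch) != None:
--                 result[ch] += 1
--             else:
--                 result[ch] = 1
--
--     return result
-- ===== SOURCE B (Python) =====
-- def countofLowerCase(sentence):
--     chars = list(sentence)
--     return {ch: chars.count(ch) for ch in dict.fromkeys(chars) if ch.islower()}
-- ===== Notes on version B (the rewrite author's own statement) =====
-- stated objective: simpler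
-- what changed: Replaces the incremental dict-update loop by a one-line comprehension: take the distinct characters in first-occurrence order (dict.fromkeys), keep the lowercase ones, and tally each with list.count.
import Mathlib
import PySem

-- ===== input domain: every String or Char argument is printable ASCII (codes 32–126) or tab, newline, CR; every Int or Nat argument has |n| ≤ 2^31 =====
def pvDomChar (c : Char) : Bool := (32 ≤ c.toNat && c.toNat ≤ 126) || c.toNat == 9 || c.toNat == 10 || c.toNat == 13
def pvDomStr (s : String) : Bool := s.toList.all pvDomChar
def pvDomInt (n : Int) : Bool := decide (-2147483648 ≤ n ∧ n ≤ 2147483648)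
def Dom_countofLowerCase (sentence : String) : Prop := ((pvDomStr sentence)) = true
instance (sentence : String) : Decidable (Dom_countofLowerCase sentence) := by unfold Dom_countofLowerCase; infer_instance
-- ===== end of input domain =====

-- B replaces A's incremental dict-update loop by a distinct-keys pass (dict.fromkeys) with one
-- list.count tally per lowercase key: simpler one-liner, same mapping.

-- ===== PORT A =====
-- for ch in sentence: if ch.islower(): result[ch] = result[ch]+1 if present else 1; return result
def countofLowerCase (sentence : String) : List (String × Int) :=
  (sentence.toList.foldl
    (fun (result : PySem.Dict String Int) ch =>
      if PySem.Chars.islower ch == true then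
        if (result.get? (String.singleton ch)).isSome then
          result.modify (String.singleton ch) 0 (· + 1)
        else
          result.insert (String.singleton ch) 1
      else result)
    PySem.Dict.empty).items

-- ===== PORT B =====
-- {ch: chars.count(ch) for ch in dict.fromkeys(chars) if ch.islower()} — the comprehension's keys
-- are distinct (dict.fromkeys), so the dict it builds is the filtered/mapped item list itself.
def countofLowerCase_alt (sentence : String) : List (String × Int) :=
  let chars := sentence.toList
  ((PySem.List.dedup chars).filter (fun ch => PySem.Chars.islower ch)).map
    (fun ch => (String.singleton ch, (chars.count ch : Int)))

-- ===== PRECONDITION & SPEC =====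
def Spec_countofLowerCase (sentence : String) (out : List (String × Int)) : Prop := out = countofLowerCase_alt sentence
instance (sentence : String) (out : List (String × Int)) : Decidable (Spec_countofLowerCase sentence out) := by unfold Spec_countofLowerCase; infer_instance

-- ===== CLAIM (what is proved, stated in full; the proofs are below) =====
def Claim_equal_countofLowerCase : Prop := ∀ (sentence : String), Dom_countofLowerCase sentence → Spec_countofLowerCase sentence (countofLowerCase sentence)

-- ===== LEMMAS AND PROOFS =====

-- A's branch pair (present → modify, absent → insert 1) is exactly Dict.modify with default 0.
theorem pv_branch_eq_modify (d : PySem.Dict String Int) (k : String) :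
    (if (d.get? k).isSome then d.modify k 0 (· + 1) else d.insert k 1) = d.modify k 0 (· + 1) := by
  by_cases h : (d.get? k).isSome
  · simp [h]
  · simp only [Option.isSome] at h
    simp [PySem.Dict.modify, PySem.Dict.getD]
    cases hg : d.get? k with
    | none => simp
    | some v => simp [hg] at h

-- a foldl that skips elements failing p equals the foldl over the filtered list
theorem pv_foldl_guard {α β : Type} (p : α → Bool) (f : β → α → β) :
    ∀ (xs : List α) (b : β),
      xs.foldl (fun acc x => if p x then f acc x else acc) b = (xs.filter p).foldl f b := by
  intro xs
  induction xs with
  | nil => intro b; rfl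
  | cons x t ih =>
      intro b
      by_cases h : p x = true <;> simp [h, ih]

-- Set.ofList commutes with filter
theorem pv_foldl_add_filter {α : Type} [DecidableEq α] (p : α → Bool) :
    ∀ (xs s : List α),
      ((xs.filter p).foldl PySem.Set.add (s.filter p)) = (xs.foldl PySem.Set.add s).filter p := by
  intro xs
  induction xs with
  | nil => intro s; rfl
  | cons x t ih =>
      intro s
      by_cases h : p x = true
      · have hadd : PySem.Set.add (s.filter p) x = (PySem.Set.add s x).filter p := by
          simp only [PySem.Set.add, PySem.Set.contains, List.contains]
          by_cases hm : x ∈ s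
          · simp [hm, List.mem_filter, h]
          · simp [hm, List.mem_filter, List.filter_append, h]
        simp only [List.filter_cons, h, if_true, List.foldl_cons, hadd]
        exact ih (PySem.Set.add s x)
      · have hadd : (PySem.Set.add s x).filter p = s.filter p := by
          simp only [PySem.Set.add, PySem.Set.contains, List.contains]
          by_cases hm : x ∈ s
          · simp [hm]
          · simp [hm, List.filter_append, h]
        simp only [List.filter_cons, h, List.foldl_cons]
        have := ih (PySem.Set.add s x)
        rw [hadd] at this
        simpa using this
  
theorem pv_ofList_filter {α : Type} [DecidableEq α] (p : α → Bool) (xs : List α) :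
    PySem.Set.ofList (xs.filter p) = (PySem.Set.ofList xs).filter p := by
  have h := pv_foldl_add_filter p xs []
  simpa [PySem.Set.ofList_eq_foldl] using h

-- Set.ofList commutes with map by an injective function
theorem pv_foldl_add_map {α β : Type} [DecidableEq α] [DecidableEq β]
    (f : α → β) (hf : Function.Injective f) :
    ∀ (xs s : List α),
      ((xs.map f).foldl PySem.Set.add (s.map f)) = (xs.foldl PySem.Set.add s).map f := by
  intro xs
  induction xs with
  | nil => intro s; rfl
  | cons x t ih =>
      intro s
      have hadd : PySem.Set.add (s.map f) (f x) = (PySem.Set.add s x).map f := by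
        simp only [PySem.Set.add, PySem.Set.contains, List.contains]
        by_cases hm : x ∈ s
        · simp [hm, List.mem_map, hf.eq_iff]
        · have : f x ∉ s.map f := by
            simp only [List.mem_map, not_exists]
            intro a ⟨ha, he⟩
            exact hm (hf he ▸ ha)
          simp [hm, this]
      simp only [List.map_cons, List.foldl_cons, hadd]
      exact ih (PySem.Set.add s x)

theorem pv_ofList_map {α β : Type} [DecidableEq α] [DecidableEq β]
    (f : α → β) (hf : Function.Injective f) (xs : List α) :
    PySem.Set.ofList (xs.map f) = (PySem.Set.ofList xs).map f := by
  have h := pv_foldl_add_map f hf xs []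
  simpa [PySem.Set.ofList_eq_foldl] using h

theorem pv_singleton_inj : Function.Injective String.singleton := by
  intro a b h
  simpa using congrArg String.toList h

-- ===== VERDICT (by name: the statement is the Claim_ definition above) =====
theorem countofLowerCase_spec : Claim_equal_countofLowerCase := by
  intro sentence _
  unfold Spec_countofLowerCase countofLowerCase countofLowerCase_alt
  set l := sentence.toList with hl
  set p : Char → Bool := fun ch => PySem.Chars.islower ch with hp
  -- collapse A's branches into Dict.modify
  have hstep : (l.foldl
      (fun (result : PySem.Dict String Int) ch =>
        if PySem.Chars.islower ch == true then
          if (result.get? (String.singleton ch)).isSome then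
            result.modify (String.singleton ch) 0 (· + 1)
          else result.insert (String.singleton ch) 1
        else result) PySem.Dict.empty) =
      (l.foldl (fun (result : PySem.Dict String Int) ch =>
        if p ch then result.modify (String.singleton ch) 0 (· + 1) else result) PySem.Dict.empty) := by
    apply PySem.List.foldl_congr_mem
    intro d ch _
    by_cases h : PySem.Chars.islower ch = true
    · simp [hp, h, pv_branch_eq_modify]
    · simp [hp, h]
  rw [hstep, pv_foldl_guard p, ← List.foldl_map (f := String.singleton)
        (g := fun (d : PySem.Dict String Int) k => d.modify k 0 (· + 1)),
      ← PySem.Dict.counter_eq_foldl, PySem.Dict.items_counter,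
      pv_ofList_map _ pv_singleton_inj, List.map_map]
  simp only [PySem.List.dedup_eq_ofList, pv_ofList_filter]
  apply List.map_congr_left
  intro ch hch
  have hpch : p ch = true := (List.mem_filter.mp hch).2
  simp only [Function.comp]
  congr 1
  rw [List.count_map_of_injective _ _ pv_singleton_inj, List.count_filter hpch]
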